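-- pv_equiv track=rewrite | github.com/joohanna/PythonCourse | lifetime.py | calcLifetime
-- ===== SOURCE A (Python) =====
-- def calcLifetime(list):
-- 	#calculates the lifetime for a contact
-- 	#input: a list where each element in the list contains a number 1 (contact is present) or 0 (contact is not present)
-- 	#output: returns a list of lifetimes for the contact
-- 	lifetimeList = []
-- 	lifetime = 0
--
-- 	#a for loop iterates over each element in the list and updates a variable lifetime if the line is equal to 1
-- 	#if the line is equal to 0 and the variable lifetime has a value > 1, the value is appended to the lifetime list
-- 	#else it continues.
-- 	for line in list:
-- 		line = int(line)
-- 		if line == 1: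
-- 			lifetime +=1
-- 		elif line == 0 and lifetime >= 1:
-- 			lifetime = lifetime*10 #values are in 10 ps so to get number in ps the parameter is multiplied by 10
-- 			lifetimeList.append(lifetime)
-- 			lifetime = 0
-- 		else:
-- 			continue
-- 	return lifetimeList
-- ===== SOURCE B (Python) =====
-- def calcLifetime(list):
-- 	#run-length based re-implementation: build an RLE of the 0/1 stream
-- 	#(most recent run first), drop the unfinished trailing 1-run, then
-- 	#emit 10*length for every closed 1-run in order.
-- 	runs = []  # most recent run first: (value, length)
-- 	for v in list:
-- 		v = int(v)
-- 		if v == 0 or v == 1: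
-- 			if runs and runs[0][0] == v:
-- 				runs[0] = (v, runs[0][1] + 1)
-- 			else:
-- 				runs = [(v, 1)] + runs
-- 	if runs and runs[0][0] == 1:
-- 		runs = runs[1:]
-- 	return [10 * n for v, n in reversed(runs) if v == 1]
-- ===== Notes on version B (the rewrite author's own statement) =====
-- stated objective: alternative
-- what changed: Replaces the live counter-and-flush state machine by a run-length encoding pass over the 0/1 stream: build RLE groups (most recent first), drop the unfinished trailing 1-run, then map 10*length over the closed 1-runs.
import Mathlib
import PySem

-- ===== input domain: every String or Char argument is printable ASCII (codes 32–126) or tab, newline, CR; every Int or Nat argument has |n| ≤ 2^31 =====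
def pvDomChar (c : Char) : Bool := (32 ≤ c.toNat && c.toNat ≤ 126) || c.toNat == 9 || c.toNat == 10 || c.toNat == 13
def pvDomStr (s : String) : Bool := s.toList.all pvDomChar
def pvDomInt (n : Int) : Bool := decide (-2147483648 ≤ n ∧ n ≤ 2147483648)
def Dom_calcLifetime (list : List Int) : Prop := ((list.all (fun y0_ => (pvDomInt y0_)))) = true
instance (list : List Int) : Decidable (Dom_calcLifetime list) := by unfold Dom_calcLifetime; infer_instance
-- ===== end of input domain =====

-- B replaces A's counter-and-flush state machine by a run-length-encoding pass (alternative, same cost).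

-- ===== PORT A =====
-- one loop iteration of A: state = (lifetimeList, lifetime)
def pvStepA (s : List Int × Int) (line : Int) : List Int × Int :=
  if line = 1 then (s.1, s.2 + 1)
  else if line = 0 ∧ 1 ≤ s.2 then (s.1 ++ [s.2 * 10], 0)
  else s

def calcLifetime (list : List Int) : List Int :=
  (list.foldl pvStepA ([], 0)).1

-- ===== PORT B =====
-- one loop iteration of B: runs = RLE of the 0/1 stream, most recent run first
def pvStepB (runs : List (Int × Int)) (v : Int) : List (Int × Int) :=
  if v = 0 ∨ v = 1 then
    match runs with
    | (k, n) :: rest => if k = v then (v, n + 1) :: rest else (v, 1) :: (k, n) :: rest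
    | [] => [(v, 1)]
  else runs

-- drop the unfinished trailing 1-run (the head of the reversed RLE)
def pvDropTrail (runs : List (Int × Int)) : List (Int × Int) :=
  match runs with
  | (k, n) :: rest => if k = 1 then rest else (k, n) :: rest
  | [] => []

def calcLifetime_alt (list : List Int) : List Int :=
  ((pvDropTrail (list.foldl pvStepB [])).reverse.filter (fun p => p.1 == 1)).map
    (fun p => 10 * p.2)

-- ===== PRECONDITION & SPEC =====
def Spec_calcLifetime (list : List Int) (out : List Int) : Prop := out = calcLifetime_alt list
instance (list : List Int) (out : List Int) : Decidable (Spec_calcLifetime list out) := by unfold Spec_calcLifetime; infer_instance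

-- ===== CLAIM (what is proved, stated in full; the proofs are below) =====
def Claim_equal_calcLifetime : Prop := ∀ (list : List Int), Dom_calcLifetime list → Spec_calcLifetime list (calcLifetime list)

-- ===== LEMMAS AND PROOFS =====

-- A's lifetime counter, read off the RLE
def pvHeadOne (R : List (Int × Int)) : Int :=
  match R with
  | (k, n) :: _ => if k = 1 then n else 0
  | [] => 0

-- A's lifetimeList, read off the RLE
def pvFin (R : List (Int × Int)) : List Int :=
  ((pvDropTrail R).reverse.filter (fun p => p.1 == 1)).map (fun p => 10 * p.2)

theorem pvInv_step (R : List (Int × Int)) (v : Int) (h : ∀ p ∈ R, 1 ≤ p.2) :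
    ∀ p ∈ pvStepB R v, 1 ≤ p.2 := by
  intro p hp
  unfold pvStepB at hp
  split_ifs at hp with h01
  · match R, h, hp with
    | [], _, hp => simp at hp; simp [hp]
    | (k, n) :: rest, h, hp =>
      by_cases hk : k = v
      · simp [hk] at hp
        rcases hp with hp | hp
        · have := h (k, n) (by simp); subst hp; simp at this ⊢; omega
        · exact h p (by simp [hp])
      · simp [hk] at hp
        rcases hp with hp | hp
        · subst hp; simp
        · exact h p (by simp [hp])
  · exact h p hp

theorem pvStep_eq (R : List (Int × Int)) (v : Int) (h : ∀ p ∈ R, 1 ≤ p.2) :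
    pvStepA (pvFin R, pvHeadOne R) v = (pvFin (pvStepB R v), pvHeadOne (pvStepB R v)) := by
  match R with
  | [] =>
    by_cases h1 : v = 1
    · subst h1; simp [pvStepA, pvStepB, pvFin, pvDropTrail, pvHeadOne]
    · by_cases h0 : v = 0
      · subst h0; simp [pvStepA, pvStepB, pvFin, pvDropTrail, pvHeadOne]
      · simp [pvStepA, pvStepB, pvFin, pvDropTrail, pvHeadOne, h0, h1]
  | (k, n) :: rest =>
    have hn : 1 ≤ n := h (k, n) (by simp)
    by_cases h1 : v = 1
    · subst h1
      by_cases hk : k = 1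
      · subst hk; simp [pvStepA, pvStepB, pvFin, pvDropTrail, pvHeadOne]
      · simp [pvStepA, pvStepB, pvFin, pvDropTrail, pvHeadOne, hk]
    · by_cases h0 : v = 0
      · subst h0
        by_cases hk : k = 1
        · subst hk
          simp [pvStepA, pvStepB, pvFin, pvDropTrail, pvHeadOne, hn,
            List.filter_append, List.map_append]
          omega
        · by_cases hk0 : k = 0
          · subst hk0
            simp [pvStepA, pvStepB, pvFin, pvDropTrail, pvHeadOne,
              List.filter_append]
          · simp [pvStepA, pvStepB, pvFin, pvDropTrail, pvHeadOne, hk, hk0,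
              List.filter_append]
      · by_cases hk : k = 1
        · subst hk; simp [pvStepA, pvStepB, pvFin, pvDropTrail, pvHeadOne, h0, h1]
        · simp [pvStepA, pvStepB, pvFin, pvDropTrail, pvHeadOne, h0, h1, hk]

theorem pvMain (l : List Int) : ∀ (R : List (Int × Int)), (∀ p ∈ R, 1 ≤ p.2) →
    (l.foldl pvStepA (pvFin R, pvHeadOne R)).1 = pvFin (l.foldl pvStepB R) := by
  induction l with
  | nil => intro R _; simp [List.foldl]
  | cons v l ih =>
    intro R h
    have := pvStep_eq R v h
    simp only [List.foldl, this]
    exact ih (pvStepB R v) (pvInv_step R v h)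

-- ===== VERDICT (by name: the statement is the Claim_ definition above) =====
theorem calcLifetime_spec : Claim_equal_calcLifetime := by
  intro list _
  unfold Spec_calcLifetime calcLifetime calcLifetime_alt
  have := pvMain list [] (by simp)
  simpa [pvFin, pvHeadOne, pvDropTrail] using this
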